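-- pv_equiv track=rewrite | github.com/yushyn-andriy/algo | competitions/onlinejudge/unsorted/11078/p11078.py | solve
-- ===== SOURCE A (Python) =====
-- def solve(scores):
--     max_so_far = scores[0]
--     diff = -1
--     for score in scores:
--         if score > max_so_far:
--             max_so_far = score
--         else:
--             diff = max(diff, max_so_far - score)
--
--     if diff in [-1, 0]:
--         return -1
--     return diff
-- ===== SOURCE B (Python) =====
-- def solve(scores):
--     cur_max = scores[0]
--     prefix_max = []
--     for s in scores:
--         if s > cur_max:
--             cur_max = s
--         prefix_max.append(cur_max)
--     diff = max(m - s for m, s in zip(prefix_max, scores))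
--     return diff if diff > 0 else -1
-- ===== Notes on version B (the rewrite author's own statement) =====
-- stated objective: alternative
-- what changed: B replaces A's single inline fold (running max + running best diff with a -1 sentinel) by two separate passes: build an explicit prefix-maximum table, then take the max of prefix_max[i]-scores[i] over a zip, returning -1 iff that max is not positive.
import Mathlib
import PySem

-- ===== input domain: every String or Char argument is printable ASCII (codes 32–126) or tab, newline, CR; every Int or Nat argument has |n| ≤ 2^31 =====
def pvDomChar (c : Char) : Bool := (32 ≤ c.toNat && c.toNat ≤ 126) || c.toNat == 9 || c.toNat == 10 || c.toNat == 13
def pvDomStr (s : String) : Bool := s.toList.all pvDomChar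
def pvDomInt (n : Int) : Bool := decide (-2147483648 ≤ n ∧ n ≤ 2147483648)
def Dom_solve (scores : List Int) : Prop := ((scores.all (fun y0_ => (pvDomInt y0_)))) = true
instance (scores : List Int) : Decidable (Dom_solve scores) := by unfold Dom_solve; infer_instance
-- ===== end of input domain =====

-- B rebuilds the answer in two passes (an explicit prefix-maximum table, then a max over
-- pairwise differences) instead of A's single fold with a -1 sentinel; return value only.

-- ===== PORT A =====
def solve (scores : List Int) : Int :=
  match scores with
  | [] => 0  -- Python raises IndexError on scores[0]; excluded by Pre_solve
  | s0 :: _ =>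
    let st := scores.foldl
      (fun (p : Int × Int) score =>
        if score > p.1 then (score, p.2) else (p.1, max p.2 (p.1 - score)))
      (s0, -1)
    if st.2 = -1 ∨ st.2 = 0 then -1 else st.2

-- ===== PORT B =====
def solve_alt (scores : List Int) : Int :=
  match scores with
  | [] => 0  -- Python raises IndexError on scores[0]; excluded by Pre_solve
  | s0 :: _ =>
    let pm := (scores.foldl
      (fun (acc : Int × List Int) s =>
        let m := if s > acc.1 then s else acc.1
        (m, acc.2 ++ [m])) (s0, ([] : List Int))).2
    let diffs := (pm.zip scores).map (fun p => p.1 - p.2)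
    match PySem.List.max? diffs (fun y => y) with
    | none => 0  -- unreachable: diffs nonempty since scores is nonempty
    | some diff => if diff > 0 then diff else -1

-- ===== PRECONDITION & SPEC =====
-- Pre_ excludes only the empty list, on which Python A raises IndexError (scores[0]).
def Pre_solve (scores : List Int) : Prop := scores ≠ []
instance (scores : List Int) : Decidable (Pre_solve scores) := by unfold Pre_solve; infer_instance
def pvWitness_solve : List Int := [7, 3, 9, 2]

def Spec_solve (scores : List Int) (out : Int) : Prop := out = solve_alt scores
instance (scores : List Int) (out : Int) : Decidable (Spec_solve scores out) := by unfold Spec_solve; infer_instance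

-- ===== CLAIM (what is proved, stated in full; the proofs are below) =====
def Claim_equal_solve : Prop := ∀ (scores : List Int), Dom_solve scores → Pre_solve scores → Spec_solve scores (solve scores)

-- ===== LEMMAS AND PROOFS =====

-- recursive reading of A's fold
def auxA : List Int → Int → Int → Int × Int
  | [], m, d => (m, d)
  | s :: t, m, d => if s > m then auxA t s d else auxA t m (max d (m - s))

-- recursive reading of B's prefix-max table
def pmList : List Int → Int → List Int
  | [], _ => []
  | s :: t, m => let m' := if s > m then s else m; m' :: pmList t m'

-- the list of differences prefix_max[i] - scores[i]
def diffList : List Int → Int → List Int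
  | [], _ => []
  | s :: t, m => let m' := if s > m then s else m; (m' - s) :: diffList t m'

theorem foldA_eq (l : List Int) : ∀ (m d : Int),
    l.foldl (fun (p : Int × Int) score =>
      if score > p.1 then (score, p.2) else (p.1, max p.2 (p.1 - score))) (m, d)
      = auxA l m d := by
  induction l with
  | nil => intro m d; rfl
  | cons s t ih =>
    intro m d
    simp only [List.foldl_cons, auxA]
    by_cases h : s > m <;> simp [h, ih]

theorem foldB_eq (l : List Int) : ∀ (m : Int) (acc : List Int),
    (l.foldl (fun (acc : Int × List Int) s =>
      let m := if s > acc.1 then s else acc.1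
      (m, acc.2 ++ [m])) (m, acc)).2 = acc ++ pmList l m := by
  induction l with
  | nil => intro m acc; simp [pmList]
  | cons s t ih =>
    intro m acc
    simp only [List.foldl_cons, pmList]
    rw [ih]
    simp

theorem zip_pm (l : List Int) : ∀ (m : Int),
    ((pmList l m).zip l).map (fun p => p.1 - p.2) = diffList l m := by
  induction l with
  | nil => intro m; rfl
  | cons s t ih =>
    intro m
    simp only [pmList, diffList, List.zip_cons_cons, List.map_cons, ih]

theorem auxA_diff (l : List Int) : ∀ (m d : Int), 0 ≤ d →
    (auxA l m d).2 = List.foldl max d (diffList l m) := by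
  induction l with
  | nil => intro m d _; rfl
  | cons s t ih =>
    intro m d hd
    simp only [auxA, diffList]
    by_cases h : s > m
    · simp only [h, if_pos]
      rw [ih s d hd, List.foldl_cons]
      have hds : max d (s - s) = d := by omega
      rw [hds]
    · simp only [h, if_false]
      rw [ih m (max d (m - s)) (by omega), List.foldl_cons]

theorem foldl_max_nonneg (l : List Int) : ∀ (d : Int), 0 ≤ d → 0 ≤ List.foldl max d l := by
  induction l with
  | nil => intro d hd; simpa using hd
  | cons x t ih => intro d hd; simp only [List.foldl_cons]; exact ih _ (by omega)

-- ===== VERDICT (by name: the statement is the Claim_ definition above) =====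
theorem solve_spec : Claim_equal_solve := by
  intro scores _ hpre
  unfold Spec_solve
  match scores with
  | [] => exact absurd rfl hpre
  | s0 :: rest =>
    simp only [solve, solve_alt]
    rw [foldA_eq, foldB_eq]
    simp only [List.nil_append]
    rw [zip_pm]
    have hd0 : diffList (s0 :: rest) s0 = 0 :: diffList rest s0 := by
      simp [diffList]
    have ha : auxA (s0 :: rest) s0 (-1) = auxA rest s0 0 := by
      simp [auxA]
    rw [hd0, ha, PySem.List.max?_id_cons]
    rw [auxA_diff rest s0 0 (le_refl 0)]
    have hnn : 0 ≤ List.foldl max 0 (diffList rest s0) :=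
      foldl_max_nonneg _ 0 (le_refl 0)
    set D := List.foldl max 0 (diffList rest s0) with hD
    by_cases h : D = 0
    · simp [h]
    · have : ¬ (D = -1 ∨ D = 0) := by omega
      simp only [this, if_false]
      have : D > 0 := by omega
      simp [this]
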